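-- pv_equiv track=rewrite | github.com/d-mooers/SmallSQL | bench/create_inserts.py | get_free_cols
-- ===== SOURCE A (Python) =====
-- def get_free_cols(columns, save_cols, reference_cols):
--     '''
--     Returns the columns that are not part of any
--     keys
--     '''
--     safe_columns = {}
--     for i, column in enumerate(columns):
--         if i not in save_cols:
--             in_ref = False
--             for t, c_i, r_c in reference_cols:
--                 if i in c_i:
--                     in_ref = True
--                     break
--             if not in_ref:
--                 safe_columns[i] = column
--     return safe_columns
-- ===== SOURCE B (Python) =====
-- def get_free_cols(columns, save_cols, reference_cols):
--     '''
--     Returns the columns that are not part of any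
--     keys
--     '''
--     safe = dict(enumerate(columns))
--     for i in save_cols:
--         safe.pop(i, None)
--     for t, c_i, r_c in reference_cols:
--         for idx in c_i:
--             safe.pop(idx, None)
--     return safe
-- ===== Notes on version B (the rewrite author's own statement) =====
-- stated objective: faster
-- what changed: B builds the full index->column dict once and then iterates over the exclusion sources (save_cols and each reference key list) deleting entries, instead of A's loop over all columns with a nested membership scan of save_cols and reference_cols per column; dict order preservation keeps the surviving entries in enumerate order.
import Mathlib
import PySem

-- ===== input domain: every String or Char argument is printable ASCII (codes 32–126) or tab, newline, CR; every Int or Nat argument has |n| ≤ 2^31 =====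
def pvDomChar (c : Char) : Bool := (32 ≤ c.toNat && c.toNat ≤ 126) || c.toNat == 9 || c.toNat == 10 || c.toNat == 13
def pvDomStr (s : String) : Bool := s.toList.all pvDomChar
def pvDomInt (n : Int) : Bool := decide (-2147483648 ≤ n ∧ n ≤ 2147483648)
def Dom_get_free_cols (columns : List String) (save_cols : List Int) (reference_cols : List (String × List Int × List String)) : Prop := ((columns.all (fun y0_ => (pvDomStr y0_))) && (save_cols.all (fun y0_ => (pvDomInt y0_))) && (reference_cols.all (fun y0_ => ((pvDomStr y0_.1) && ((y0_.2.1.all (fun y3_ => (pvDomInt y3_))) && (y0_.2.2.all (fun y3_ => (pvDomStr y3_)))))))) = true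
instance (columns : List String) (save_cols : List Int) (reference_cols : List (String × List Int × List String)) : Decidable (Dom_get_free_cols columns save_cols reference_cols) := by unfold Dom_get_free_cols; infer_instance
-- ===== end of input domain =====

-- B replaces A's all-columns loop with a nested membership scan per column by building the
-- full index->column dict once and deleting the excluded indices (objective: faster; the
-- timing run measured B faster on the generated inputs).


-- ===== PORT A =====
def get_free_cols (columns : List String) (save_cols : List Int) (reference_cols : List (String × List Int × List String)) : List (Int × String) :=
  ((PySem.List.enumerate columns 0).foldl
    (fun (d : PySem.Dict Int String) p =>
      if p.1 ∈ save_cols then d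
      else if reference_cols.any (fun r => r.2.1.contains p.1) then d
      else d.insert p.1 p.2)
    PySem.Dict.empty).items

-- ===== PORT B =====
def get_free_cols_alt (columns : List String) (save_cols : List Int) (reference_cols : List (String × List Int × List String)) : List (Int × String) :=
  let safe0 := PySem.Dict.ofList (PySem.List.enumerate columns 0)
  let safe1 := save_cols.foldl PySem.Dict.erase safe0
  let safe2 := reference_cols.foldl (fun d r => r.2.1.foldl PySem.Dict.erase d) safe1
  safe2.items

-- ===== PRECONDITION & SPEC =====
def Spec_get_free_cols (columns : List String) (save_cols : List Int) (reference_cols : List (String × List Int × List String)) (out : List (Int × String)) : Prop := out = get_free_cols_alt columns save_cols reference_cols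
instance (columns : List String) (save_cols : List Int) (reference_cols : List (String × List Int × List String)) (out : List (Int × String)) : Decidable (Spec_get_free_cols columns save_cols reference_cols out) := by unfold Spec_get_free_cols; infer_instance

-- ===== CLAIM (what is proved, stated in full; the proofs are below) =====
def Claim_equal_get_free_cols : Prop := ∀ (columns : List String) (save_cols : List Int) (reference_cols : List (String × List Int × List String)), Dom_get_free_cols columns save_cols reference_cols → Spec_get_free_cols columns save_cols reference_cols (get_free_cols columns save_cols reference_cols)

-- ===== LEMMAS AND PROOFS =====

-- erasing every key of l from d filters d's items by non-membership of the key in l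
theorem items_foldl_erase (l : List Int) (d : PySem.Dict Int String) :
    (l.foldl PySem.Dict.erase d).items = d.items.filter (fun p => !l.contains p.1) := by
  induction l generalizing d with
  | nil => simp
  | cons e l ih =>
    simp only [List.foldl_cons, ih, PySem.Dict.erase, List.filter_filter]
    apply List.filter_congr
    intro p _
    show (!l.contains p.1 && !(p.1 == e)) = !(e :: l).contains p.1
    cases he : (p.1 == e) <;> simp_all [List.contains_eq_mem]

-- the nested erase loop over reference_cols filters by "no reference key list contains the key"
theorem items_foldl_erase_refs (refs : List (String × List Int × List String))
    (d : PySem.Dict Int String) :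
    (refs.foldl (fun d r => r.2.1.foldl PySem.Dict.erase d) d).items
      = d.items.filter (fun p => !refs.any (fun r => r.2.1.contains p.1)) := by
  induction refs generalizing d with
  | nil => simp
  | cons r refs ih =>
    simp only [List.foldl_cons, ih, items_foldl_erase, List.filter_filter]
    apply List.filter_congr
    intro p _
    simp [Bool.and_comm]

-- A's conditional-insert loop over pairs with fresh distinct keys appends the kept pairs
theorem items_foldl_insert_if (keep : Int × String → Bool) (l : List (Int × String))
    (d : PySem.Dict Int String)
    (hfresh : ∀ p ∈ l, d.contains p.1 = false) (hnodup : (l.map (·.1)).Nodup) :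
    (l.foldl (fun d p => if keep p then d.insert p.1 p.2 else d) d).items
      = d.items ++ l.filter keep := by
  induction l generalizing d with
  | nil => simp
  | cons p l ih =>
    simp only [List.map_cons, List.nodup_cons, List.mem_map] at hnodup
    by_cases hk : keep p
    · have hfresh' : ∀ q ∈ l, (d.insert p.1 p.2).contains q.1 = false := by
        intro q hq
        rw [PySem.Dict.contains_insert]
        have h1 : q.1 ≠ p.1 := fun h => hnodup.1 ⟨q, hq, h⟩
        simp [h1, hfresh q (List.mem_cons_of_mem _ hq)]
      rw [List.foldl_cons, if_pos hk, ih _ hfresh' hnodup.2,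
        PySem.Dict.items_insert_of_not_contains _ _ (hfresh p (List.mem_cons_self ..)),
        List.filter_cons_of_pos hk, List.append_assoc, List.singleton_append]
    · rw [List.foldl_cons, if_neg hk,
        ih d (fun q hq => hfresh q (List.mem_cons_of_mem _ hq)) hnodup.2,
        List.filter_cons_of_neg hk]

-- the first components of enumerate are distinct
theorem nodup_fst_enumerate (xs : List String) (s : Int) :
    ((PySem.List.enumerate xs s).map (·.1)).Nodup := by
  rw [List.nodup_iff_pairwise_ne, List.pairwise_map]
  exact (PySem.List.pairwise_lt_enumerate xs s).imp (fun h => ne_of_lt h)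

-- ===== VERDICT (by name: the statement is the Claim_ definition above) =====
theorem get_free_cols_spec : Claim_equal_get_free_cols := by
  intro columns save_cols reference_cols _
  unfold Spec_get_free_cols get_free_cols get_free_cols_alt
  rw [PySem.List.foldl_congr_mem _ _
    (fun (d : PySem.Dict Int String) p =>
      if (!save_cols.contains p.1 && !reference_cols.any (fun r => r.2.1.contains p.1))
      then d.insert p.1 p.2 else d) _
    (by
      intro d p _
      beta_reduce
      cases h2 : reference_cols.any (fun r => r.2.1.contains p.1) <;>
        by_cases h1 : p.1 ∈ save_cols <;> simp [h1, List.contains_eq_mem])]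
  rw [items_foldl_insert_if _ _ _ (by simp) (nodup_fst_enumerate columns 0),
    items_foldl_erase_refs, items_foldl_erase]
  simp only [PySem.Dict.ofList, PySem.Dict.update]
  rw [PySem.Dict.items_foldl_insert_fresh (l := PySem.List.enumerate columns 0)
    (k := fun p => p.1) (v := fun p => p.2) (d := PySem.Dict.empty)
    (by simp) (nodup_fst_enumerate columns 0)]
  simp [List.filter_filter, PySem.Dict.empty, Bool.and_comm]
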